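-- pv_equiv track=rewrite | github.com/limkeunhyeok/algorithm-study | keunhyeok/chapter 08/me-8-3.py | solution
-- ===== SOURCE A (Python) =====
-- cache = [-1 for i in range(10000)]
--
-- INF = 987654321
--
-- def check(arr):
--     # 길이가 1이라면
--     if len(set(arr)) == 1:
--         return 1
--
--     # 길이가 2라면
--     elif len(set(arr)) == 2:
--         for i in range(len(arr)):
--             if arr[i] != arr[i % 2]:
--                 break
--             else:
--                 return 4
--
--     # 등차수열 검사
--     elif len(set(arr)) != 2:
--         d = []
--         for i in range(len(arr) - 1):
--             d.append(arr[i] - arr[i + 1])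
--         if len(set(d)) == 1:
--             if d[0] == 1:
--
--                 return 2
--             else:
--                 return 5
--         else:
--             return 10
--
-- def solution(num, index):
--     if index == len(num):
--         return 0
--
--     res = cache[index]
--     if res != -1:
--         return res
--
--     res = INF
--     for i in range(3, 6):
--         if index + i <= len(num):
--             res = min(res, solution(num, index + i) + check(num[index : index + i - 1]))
--     return res
-- ===== SOURCE B (Python) =====
-- INF = 987654321
--
-- def pattern_cost(arr):
--     s = set(arr)
--     if len(s) == 1:
--         return 1
--     if len(s) == 2:
--         return 4
--     diffs = {arr[i] - arr[i + 1] for i in range(len(arr) - 1)}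
--     if len(diffs) == 1:
--         return 2 if arr[0] - arr[1] == 1 else 5
--     return 10
--
-- def solution(num, index):
--     n = len(num)
--     if index >= n:
--         return 0 if index == n else INF
--     dp = {n: 0}
--     for j in range(n - 1, index - 1, -1):
--         best = INF
--         for i in (3, 4, 5):
--             if j + i <= n:
--                 best = min(best, dp[j + i] + pattern_cost(num[j:j + i - 1]))
--         dp[j] = best
--     return dp[index]
-- ===== Notes on version B (the rewrite author's own statement) =====
-- stated objective: faster
-- what changed: A's memo cache is never written, making it exponential top-down recursion; B fills the dp table bottom-up from the end of the list down to the start index and reads dp[index] once.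
import Mathlib
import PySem

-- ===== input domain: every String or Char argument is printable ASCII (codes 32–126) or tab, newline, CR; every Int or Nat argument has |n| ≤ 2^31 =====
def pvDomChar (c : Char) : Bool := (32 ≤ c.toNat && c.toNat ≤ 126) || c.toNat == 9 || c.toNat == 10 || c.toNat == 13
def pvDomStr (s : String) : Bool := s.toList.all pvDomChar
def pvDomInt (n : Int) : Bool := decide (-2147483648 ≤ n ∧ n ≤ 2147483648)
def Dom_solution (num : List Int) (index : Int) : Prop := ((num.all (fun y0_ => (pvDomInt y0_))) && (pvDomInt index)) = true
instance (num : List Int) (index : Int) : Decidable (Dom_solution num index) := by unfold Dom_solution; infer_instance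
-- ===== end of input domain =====

-- B replaces A's exponential recursion (its memo cache is never written) by a bottom-up DP table over the indices.

-- ===== PORT A =====
-- check(arr): the size-2 branch's for-loop returns 4 at its first iteration (arr[0] != arr[0%2] is false);
-- the loop's fall-through (Python: None) is unreachable there since |set(arr)| = 2 forces arr ≠ [].
def checkALoop (arr : List Int) : List Int → Option Int
  | [] => none                                   -- loop exhausted: check returns None (unreachable)
  | i :: _ =>
      if arr.getD i.toNat 0 ≠ arr.getD (PySem.Int.mod i 2).toNat 0 then none   -- break
      else some 4                                -- return 4
def checkA (arr : List Int) : Int :=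
  let s := PySem.Set.ofList arr
  if s.length = 1 then 1
  else if s.length = 2 then
    (checkALoop arr (PySem.List.pyRange 0 arr.length 1)).getD 0   -- .getD 0: the None fall-through, unreachable (arr ≠ [])
  else
    -- elif len(set(arr)) != 2: always taken here (set size is neither 1 nor 2)
    let d := (PySem.List.pyRange 0 ((arr.length : Int) - 1) 1).map
               (fun i => arr.getD i.toNat 0 - arr.getD (i.toNat + 1) 0)
    if (PySem.Set.ofList d).length = 1 then
      if d.headD 0 = 1 then 2 else 5             -- d[0]; d ≠ [] since |set(d)| = 1
    else 10

-- cache is created as [-1]*10000 and never written, so cache[index] is always -1 and the memo test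
-- 'if res != -1: return res' never fires (cache[index] raises IndexError iff index ∉ [-10000,10000), excluded by Pre_).
def solution (num : List Int) (index : Int) : Int :=
  if index = (num.length : Int) then 0
  else
    let res : Int := 987654321
    let res := if index + 3 ≤ (num.length : Int) then
                 min res (solution num (index + 3) + checkA (PySem.List.slice num (some index) (some (index + 3 - 1))))
               else res
    let res := if index + 4 ≤ (num.length : Int) then
                 min res (solution num (index + 4) + checkA (PySem.List.slice num (some index) (some (index + 4 - 1))))
               else res
    let res := if index + 5 ≤ (num.length : Int) then
                 min res (solution num (index + 5) + checkA (PySem.List.slice num (some index) (some (index + 5 - 1))))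
               else res
    res
termination_by ((num.length : Int) - index).toNat
decreasing_by all_goals omega

-- ===== PORT B =====
def patternCost (arr : List Int) : Int :=
  let s := PySem.Set.ofList arr
  if s.length = 1 then 1
  else if s.length = 2 then 4
  else
    let diffs := PySem.Set.ofList
      ((PySem.List.pyRange 0 ((arr.length : Int) - 1) 1).map
        (fun i => arr.getD i.toNat 0 - arr.getD (i.toNat + 1) 0))
    if diffs.length = 1 then (if arr.getD 0 0 - arr.getD 1 0 = 1 then 2 else 5)
    else 10

-- one step of B's loop body at j: tail = [dp[j+1], …, dp[n]], so dp[j+i] = tail[i-1]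
def bestAt (num : List Int) (j : Int) (tail : List Int) : Int :=
  let best : Int := 987654321
  let best := if j + 3 ≤ (num.length : Int) then
                min best (tail.getD 2 0 + patternCost (PySem.List.slice num (some j) (some (j + 2))))
              else best
  let best := if j + 4 ≤ (num.length : Int) then
                min best (tail.getD 3 0 + patternCost (PySem.List.slice num (some j) (some (j + 3))))
              else best
  let best := if j + 5 ≤ (num.length : Int) then
                min best (tail.getD 4 0 + patternCost (PySem.List.slice num (some j) (some (j + 4))))
              else best
  best

-- buildDp num k = [dp[n-k], …, dp[n]] after k iterations of B's countdown loop (j = n-1, …, n-k)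
def buildDp (num : List Int) : Nat → List Int
  | 0 => [0]
  | k + 1 => bestAt num ((num.length : Int) - (k + 1)) (buildDp num k) :: buildDp num k

def solution_alt (num : List Int) (index : Int) : Int :=
  if (num.length : Int) ≤ index then (if index = (num.length : Int) then 0 else 987654321)
  else (buildDp num ((num.length : Int) - index).toNat).headD 987654321   -- dp[index] is the front entry

-- ===== PRECONDITION & SPEC =====
-- Pre_ is exactly where A returns: A reads cache[j] (len(cache) = 10000) at the start index and at every
-- recursively visited j < len(num), so it raises IndexError iff index ∉ [-10000, 10000) (unless index = len(num),
-- returned before the read) or the recursion reaches an index ≥ 10000 (i.e. len(num) > 10000 and index + 3 < len(num)).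
def Pre_solution (num : List Int) (index : Int) : Prop :=
  index = (num.length : Int) ∨
    (-10000 ≤ index ∧ index < 10000 ∧ ((num.length : Int) ≤ 10000 ∨ (num.length : Int) ≤ index + 3))
instance (num : List Int) (index : Int) : Decidable (Pre_solution num index) := by unfold Pre_solution; infer_instance
def pvWitness_solution : List Int × Int := ([1, 2, 3, 7, 7, 7], 0)
def Spec_solution (num : List Int) (index : Int) (out : Int) : Prop := out = solution_alt num index
instance (num : List Int) (index : Int) (out : Int) : Decidable (Spec_solution num index out) := by unfold Spec_solution; infer_instance

-- ===== CLAIM (what is proved, stated in full; the proofs are below) =====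
def Claim_equal_solution : Prop := ∀ (num : List Int) (index : Int), Dom_solution num index → Pre_solution num index → Spec_solution num index (solution num index)

-- ===== LEMMAS AND PROOFS =====

theorem check_eq_pattern (arr : List Int) : checkA arr = patternCost arr := by
  unfold checkA patternCost
  match arr with
  | [] => decide
  | [x] => simp [PySem.Set.ofList, PySem.Set.add, PySem.Set.contains]
  | x :: y :: rest =>
    have hd : (List.map (fun i => (x :: y :: rest).getD i.toNat 0 - (x :: y :: rest).getD (i.toNat + 1) 0)
        (PySem.List.pyRange 0 ((((x :: y :: rest).length : Int)) - 1) 1)).headD 0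
        = (x :: y :: rest).getD 0 0 - (x :: y :: rest).getD 1 0 := by
      rw [PySem.List.pyRange_one_cons (by push_cast [List.length_cons]; omega)]
      simp
    simp only []
    rw [hd]
    split_ifs with h1 h2 h3 h4
    · rfl
    · rw [PySem.List.pyRange_one_cons (by push_cast [List.length_cons]; omega)]
      simp [checkALoop, PySem.Int.mod]
    · rfl
    · rfl
    · rfl
theorem solution_len (num : List Int) : solution num (num.length : Int) = 0 := by
  unfold solution; simp

theorem solution_gt (num : List Int) (index : Int) (h : (num.length : Int) < index) :
    solution num index = 987654321 := by
  unfold solution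
  rw [if_neg (by omega : ¬ index = (num.length : Int))]
  simp only [if_neg (by omega : ¬ index + 3 ≤ (num.length : Int)),
    if_neg (by omega : ¬ index + 4 ≤ (num.length : Int)),
    if_neg (by omega : ¬ index + 5 ≤ (num.length : Int))]

theorem bestAt_eq (num : List Int) (k : Nat) :
    bestAt num ((num.length : Int) - (k + 1))
        ((List.range (k + 1)).map (fun t : Nat => solution num ((num.length : Int) - k + (t : Int))))
      = solution num ((num.length : Int) - (k + 1)) := by
  conv_rhs => rw [solution]
  rw [if_neg (by omega : ¬ ((num.length : Int) - (k + 1) = (num.length : Int)))]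
  unfold bestAt
  simp only [check_eq_pattern,
    (by ring : ((num.length : Int) - (k + 1)) + 3 - 1 = ((num.length : Int) - (k + 1)) + 2),
    (by ring : ((num.length : Int) - (k + 1)) + 4 - 1 = ((num.length : Int) - (k + 1)) + 3),
    (by ring : ((num.length : Int) - (k + 1)) + 5 - 1 = ((num.length : Int) - (k + 1)) + 4)]
  by_cases h5 : (num.length : Int) - (k + 1) + 5 ≤ (num.length : Int)
  · have h4 : (num.length : Int) - (k + 1) + 4 ≤ (num.length : Int) := by omega
    have h3 : (num.length : Int) - (k + 1) + 3 ≤ (num.length : Int) := by omega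
    rw [PySem.List.getD_map_range _ _ _ _ (by omega : 2 < k + 1),
      (by congr 1; omega : solution num ((num.length : Int) - k + ((2 : Nat) : Int)) = solution num (((num.length : Int) - (k + 1)) + 3)),
      PySem.List.getD_map_range _ _ _ _ (by omega : 3 < k + 1),
      (by congr 1; omega : solution num ((num.length : Int) - k + ((3 : Nat) : Int)) = solution num (((num.length : Int) - (k + 1)) + 4)),
      PySem.List.getD_map_range _ _ _ _ (by omega : 4 < k + 1),
      (by congr 1; omega : solution num ((num.length : Int) - k + ((4 : Nat) : Int)) = solution num (((num.length : Int) - (k + 1)) + 5))]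
  · by_cases h4 : (num.length : Int) - (k + 1) + 4 ≤ (num.length : Int)
    · have h3 : (num.length : Int) - (k + 1) + 3 ≤ (num.length : Int) := by omega
      rw [PySem.List.getD_map_range _ _ _ _ (by omega : 2 < k + 1),
      (by congr 1; omega : solution num ((num.length : Int) - k + ((2 : Nat) : Int)) = solution num (((num.length : Int) - (k + 1)) + 3)),
        PySem.List.getD_map_range _ _ _ _ (by omega : 3 < k + 1),
      (by congr 1; omega : solution num ((num.length : Int) - k + ((3 : Nat) : Int)) = solution num (((num.length : Int) - (k + 1)) + 4))]
      simp [h3, h4, h5]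
    · by_cases h3 : (num.length : Int) - (k + 1) + 3 ≤ (num.length : Int)
      · rw [PySem.List.getD_map_range _ _ _ _ (by omega : 2 < k + 1),
      (by congr 1; omega : solution num ((num.length : Int) - k + ((2 : Nat) : Int)) = solution num (((num.length : Int) - (k + 1)) + 3))]
        simp [h3, h4, h5]
      · simp [h3, h4, h5]

theorem buildDp_spec (num : List Int) (k : Nat) :
    buildDp num k = (List.range (k + 1)).map (fun t : Nat => solution num ((num.length : Int) - k + (t : Int))) := by
  induction k with
  | zero => simp [buildDp, solution_len]
  | succ k ih =>
    rw [buildDp, ih]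
    push_cast
    have hr : List.map (fun t : Nat => solution num ((num.length : Int) - (k + 1) + (t : Int))) (List.range (k + 1 + 1))
        = solution num ((num.length : Int) - (k + 1))
          :: List.map (fun t : Nat => solution num ((num.length : Int) - (k + 1) + ((t : Int) + 1))) (List.range (k + 1)) := by
      rw [List.range_succ_eq_map]
      simp [List.map_map, Function.comp_def]
    rw [hr]
    congr 1
    · exact bestAt_eq num k
    · refine List.map_congr_left fun t ht => ?_
      congr 1
      omega

-- ===== VERDICT (by name: the statement is the Claim_ definition above) =====
theorem solution_spec : Claim_equal_solution := by
  unfold Claim_equal_solution Spec_solution solution_alt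
  intro num index hdom hpre
  by_cases hge : (num.length : Int) ≤ index
  · rw [if_pos hge]
    by_cases heq : index = (num.length : Int)
    · rw [if_pos heq, heq, solution_len]
    · rw [if_neg heq, solution_gt num index (by omega)]
  · rw [if_neg hge, buildDp_spec, List.range_succ_eq_map]
    simp only [List.map_cons, List.headD_cons]
    congr 1
    omega
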